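-- pv_equiv track=rewrite | github.com/sybarits/python-algorithm | etc_code/week1-4/짝지어제거하기.py | solution
-- ===== SOURCE A (Python) =====
-- def solution(s):
--     answer = 0
--     cstack = []
--
--     for char in s:
--         if len(cstack) == 0:
--             cstack.append(char)
--             continue
--         if cstack[-1] == char:
--             cstack.pop()
--             continue
--         cstack.append(char)
--
--     if len(cstack) == 0:
--         answer = 1
--
--     return answer
-- ===== SOURCE B (Python) =====
-- def _remove_first_pair(cur):
--     # return cur with the leftmost adjacent equal pair removed, or None if none exists
--     for i in range(len(cur) - 1):
--         if cur[i] == cur[i + 1]: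
--             return cur[:i] + cur[i + 2:]
--     return None
--
--
-- def solution(s):
--     cur = s
--     while True:
--         nxt = _remove_first_pair(cur)
--         if nxt is None:
--             return 1 if cur == "" else 0
--         cur = nxt
-- ===== Notes on version B (the rewrite author's own statement) =====
-- stated objective: alternative
-- what changed: B replaces A's one-pass stack with a fixpoint reduction: repeatedly scan the current string for the leftmost adjacent equal pair, splice it out, and restart, answering 1 iff the fixpoint is empty.
import Mathlib
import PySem

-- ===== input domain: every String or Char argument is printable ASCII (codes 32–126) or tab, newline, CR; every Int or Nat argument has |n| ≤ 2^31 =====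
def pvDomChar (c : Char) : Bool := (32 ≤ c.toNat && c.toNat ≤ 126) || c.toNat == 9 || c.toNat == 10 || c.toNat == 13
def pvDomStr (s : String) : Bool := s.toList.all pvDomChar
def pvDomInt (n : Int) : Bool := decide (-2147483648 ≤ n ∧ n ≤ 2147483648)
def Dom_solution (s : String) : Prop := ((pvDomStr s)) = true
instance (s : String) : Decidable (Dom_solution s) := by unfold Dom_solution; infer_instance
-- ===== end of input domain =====

-- B replaces A's one-pass stack with a fixpoint reduction (repeatedly delete the
-- leftmost adjacent equal pair until none remains); objective: alternative algorithm.


-- ===== PORT A =====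
-- loop body of A: uses the stack in Python's order (top = last element, pyGet? (-1) = cstack[-1])
def stepA (cstack : List Char) (c : Char) : List Char :=
  if cstack.length = 0 then cstack ++ [c]
  else if PySem.List.pyGet? cstack (-1) = some c then cstack.dropLast
  else cstack ++ [c]

def solution (s : String) : Int :=
  let cstack := s.toList.foldl stepA []
  if cstack.length = 0 then 1 else 0

-- ===== PORT B =====
-- B's _remove_first_pair: scan from the left for the first adjacent equal pair and splice it out
def removeFirstPair : List Char → Option (List Char)
  | a :: b :: t => if a = b then some t else (removeFirstPair (b :: t)).map (a :: ·)
  | _ => none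

theorem removeFirstPair_length :
    ∀ {l l' : List Char}, removeFirstPair l = some l' → l'.length + 2 = l.length := by
  intro l
  induction l with
  | nil => intro l' h; simp [removeFirstPair] at h
  | cons a t ih =>
    intro l' h
    match t with
    | [] => simp [removeFirstPair] at h
    | b :: t' =>
      by_cases hab : a = b
      · simp [removeFirstPair, hab] at h
        subst h; simp
      · simp [removeFirstPair, hab] at h
        obtain ⟨m, hm, rfl⟩ := h
        have := ih hm
        simp at this ⊢; omega

-- B's while loop: keep removing the leftmost pair until none remains
def reduceB (l : List Char) : List Char :=
  match h : removeFirstPair l with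
  | none => l
  | some l' => reduceB l'
termination_by l.length
decreasing_by have := removeFirstPair_length h; omega

def solution_alt (s : String) : Int :=
  if reduceB s.toList = [] then 1 else 0

-- ===== PRECONDITION & SPEC =====
def Spec_solution (s : String) (out : Int) : Prop := out = solution_alt s
instance (s : String) (out : Int) : Decidable (Spec_solution s out) := by unfold Spec_solution; infer_instance

-- ===== CLAIM (what is proved, stated in full; the proofs are below) =====
def Claim_equal_solution : Prop := ∀ (s : String), Dom_solution s → Spec_solution s (solution s)

-- ===== LEMMAS AND PROOFS =====

-- A's stack with the top at the head instead of the tail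
def stepR (st : List Char) (c : Char) : List Char :=
  match st with
  | [] => [c]
  | t :: r => if t = c then r else c :: t :: r

theorem stepA_reverse (st : List Char) (c : Char) :
    stepA st.reverse c = (stepR st c).reverse := by
  match st with
  | [] => simp [stepA, stepR]
  | t :: r =>
    by_cases h : t = c <;>
      simp [stepA, stepR, h, PySem.List.pyGet?, PySem.List.pyIdx?]

theorem foldl_stepA_reverse (l : List Char) (st : List Char) :
    l.foldl stepA st.reverse = (l.foldl stepR st).reverse := by
  induction l generalizing st with
  | nil => rfl
  | cons c t ih => simpa [stepA_reverse] using ih (stepR st c)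

theorem chain_stepR {st : List Char} (h : st.IsChain (· ≠ ·)) (c : Char) :
    (stepR st c).IsChain (· ≠ ·) := by
  match st with
  | [] => exact List.isChain_singleton c
  | t :: r =>
    by_cases htc : t = c
    · simpa [stepR, htc] using h.tail
    · simp only [stepR, if_neg htc]
      exact List.isChain_cons_cons.mpr ⟨fun h' => htc h'.symm, h⟩

theorem stepR_cancel {st : List Char} (h : st.IsChain (· ≠ ·)) (c : Char) :
    stepR (stepR st c) c = st := by
  match st with
  | [] => simp [stepR]
  | t :: r =>
    by_cases htc : t = c
    · match r with
      | [] => simp [stepR, htc]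
      | u :: w =>
        have htu : t ≠ u := (List.isChain_cons_cons.mp h).1
        have huc : ¬ u = c := fun h' => htu (htc.trans h'.symm)
        simp [stepR, htc, huc]
    · simp [stepR, htc]

theorem foldl_stepR_cancel {st : List Char} (h : st.IsChain (· ≠ ·))
    (u : List Char) (c : Char) (v : List Char) :
    (u ++ c :: c :: v).foldl stepR st = (u ++ v).foldl stepR st := by
  induction u generalizing st with
  | nil => simp [stepR_cancel h]
  | cons a t ih => simpa using ih (chain_stepR h a)

theorem removeFirstPair_some_split :
    ∀ {l l' : List Char}, removeFirstPair l = some l' →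
      ∃ u c v, l = u ++ c :: c :: v ∧ l' = u ++ v := by
  intro l
  induction l with
  | nil => intro l' h; simp [removeFirstPair] at h
  | cons a t ih =>
    intro l' h
    match t with
    | [] => simp [removeFirstPair] at h
    | b :: t' =>
      by_cases hab : a = b
      · subst hab
        simp [removeFirstPair] at h
        exact ⟨[], a, t', by simp, by simp [← h]⟩
      · simp [removeFirstPair, hab] at h
        obtain ⟨m, hm, rfl⟩ := h
        obtain ⟨u, c, v, hl, hm'⟩ := ih hm
        exact ⟨a :: u, c, v, by simp [hl], by simp [hm']⟩

theorem removeFirstPair_none_chain :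
    ∀ {l : List Char}, removeFirstPair l = none → l.IsChain (· ≠ ·) := by
  intro l
  induction l with
  | nil => intro _; exact List.isChain_nil
  | cons a t ih =>
    intro h
    match t with
    | [] => exact List.isChain_singleton a
    | b :: t' =>
      by_cases hab : a = b
      · simp [removeFirstPair, hab] at h
      · simp [removeFirstPair, hab] at h
        exact List.isChain_cons_cons.mpr ⟨hab, ih h⟩

theorem foldl_stepR_reduceB (l : List Char) :
    (reduceB l).foldl stepR [] = l.foldl stepR [] := by
  fun_induction reduceB l with
  | case1 l h => rfl
  | case2 l l' h ih =>
    obtain ⟨u, c, v, hl, hl'⟩ := removeFirstPair_some_split h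
    rw [ih, hl, hl', foldl_stepR_cancel List.isChain_nil u c v]

theorem reduceB_fix (l : List Char) : removeFirstPair (reduceB l) = none := by
  fun_induction reduceB l with
  | case1 l h => exact h
  | case2 l l' h ih => exact ih

theorem foldl_stepR_chain_aux :
    ∀ (l : List Char) (a : Char) (st : List Char), (a :: l).IsChain (· ≠ ·) →
      l.foldl stepR (a :: st) = l.reverse ++ a :: st := by
  intro l
  induction l with
  | nil => intros; rfl
  | cons b t ih =>
    intro a st h
    have hab : a ≠ b := (List.isChain_cons_cons.mp h).1
    have hst : stepR (a :: st) b = b :: a :: st := by simp [stepR, hab]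
    simp only [List.foldl_cons, hst]
    rw [ih b (a :: st) (List.isChain_cons_cons.mp h).2]
    simp

theorem foldl_stepR_of_chain {l : List Char} (h : l.IsChain (· ≠ ·)) :
    l.foldl stepR [] = l.reverse := by
  match l with
  | [] => rfl
  | a :: t =>
    have : stepR [] a = [a] := rfl
    simp only [List.foldl_cons, this]
    rw [foldl_stepR_chain_aux t a [] h]
    simp

-- ===== VERDICT (by name: the statement is the Claim_ definition above) =====
theorem solution_spec : Claim_equal_solution := by
  intro s _
  unfold Spec_solution solution solution_alt
  have h1 : s.toList.foldl stepA [] = (s.toList.foldl stepR []).reverse := by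
    simpa using foldl_stepA_reverse s.toList []
  have h2 : s.toList.foldl stepR [] = (reduceB s.toList).reverse := by
    rw [← foldl_stepR_reduceB,
      foldl_stepR_of_chain (removeFirstPair_none_chain (reduceB_fix s.toList))]
  simp only [h1, h2, List.length_reverse, List.length_eq_zero_iff]
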